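-- pv_equiv track=rewrite | github.com/namjmnam/Compounder | simplersplitter.py | detectConnection
-- ===== SOURCE A (Python) =====
-- def detectConnection(cwlist):
--     # 앞뒤 잘린 리스트 구축
--     frontshortened = []
--     backshortened = []
--     for i in cwlist:
--         frontshortened.append(i[1:])
--     for i in cwlist:
--         backshortened.append(i[:-1])
--
--     # 사전구축작업
--     connectionmap = {}
--     for i in range(len(cwlist)):
--         connectionmap[i] = []
--
--     for i in range(len(cwlist)):
--         for j in range(len(cwlist)):
--             if frontshortened[i] == backshortened[j]: connectionmap[i].append(j)
--     return connectionmap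
-- ===== SOURCE B (Python) =====
-- def detectConnection(cwlist):
--     # Group indices by their backshortened form once, then a single lookup per word.
--     groups = {}
--     for j, w in enumerate(cwlist):
--         groups.setdefault(w[:-1], []).append(j)
--     return {i: list(groups.get(w[1:], [])) for i, w in enumerate(cwlist)}
-- ===== Notes on version B (the rewrite author's own statement) =====
-- stated objective: faster
-- what changed: Instead of comparing every frontshortened[i] against every backshortened[j] in a nested O(n^2) scan, B groups indices by their backshortened string in one dict pass and answers each frontshortened string with a single dict lookup.
import Mathlib
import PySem

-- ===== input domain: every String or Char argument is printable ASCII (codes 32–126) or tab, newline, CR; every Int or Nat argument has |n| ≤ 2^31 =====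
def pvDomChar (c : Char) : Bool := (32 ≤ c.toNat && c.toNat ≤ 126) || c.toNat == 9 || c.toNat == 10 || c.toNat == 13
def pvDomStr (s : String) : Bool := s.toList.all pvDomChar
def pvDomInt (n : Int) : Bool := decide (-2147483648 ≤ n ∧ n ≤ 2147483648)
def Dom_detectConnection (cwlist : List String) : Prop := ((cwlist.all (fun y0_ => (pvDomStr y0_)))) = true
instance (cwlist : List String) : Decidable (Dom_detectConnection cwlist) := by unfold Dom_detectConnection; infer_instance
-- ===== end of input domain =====

-- B replaces A's all-pairs comparison by grouping indices in a dict keyed by the backshortened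
-- string and doing one lookup per frontshortened string (objective: faster).

-- ===== PORT A =====
def detectConnection (cwlist : List String) : List (Int × List Int) :=
  let frontshortened := cwlist.foldl (fun acc i => acc ++ [PySem.Str.slice i (some 1) none]) []
  let backshortened := cwlist.foldl (fun acc i => acc ++ [PySem.Str.slice i none (some (-1))]) []
  let connectionmap : PySem.Dict Int (List Int) :=
    (PySem.List.pyRange 0 (PySem.List.len cwlist) 1).foldl
      (fun d i => d.insert i ([] : List Int)) PySem.Dict.empty
  let connectionmap :=
    (PySem.List.pyRange 0 (PySem.List.len cwlist) 1).foldl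
      (fun d i =>
        (PySem.List.pyRange 0 (PySem.List.len cwlist) 1).foldl
          (fun d j =>
            if PySem.List.pyGetD frontshortened i "" == PySem.List.pyGetD backshortened j "" then
              d.modify i [] (fun v => v ++ [j])
            else d) d) connectionmap
  connectionmap.items

-- ===== PORT B =====
def detectConnection_alt (cwlist : List String) : List (Int × List Int) :=
  let groups : PySem.Dict String (List Int) :=
    (PySem.List.enumerate cwlist).foldl
      (fun d p => d.modify (PySem.Str.slice p.2 none (some (-1))) [] (fun v => v ++ [p.1]))
      PySem.Dict.empty
  ((PySem.List.enumerate cwlist).foldl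
      (fun d p => d.insert p.1 (groups.getD (PySem.Str.slice p.2 (some 1) none) []))
      (PySem.Dict.empty : PySem.Dict Int (List Int))).items

-- ===== PRECONDITION & SPEC =====
def Spec_detectConnection (cwlist : List String) (out : List (Int × List Int)) : Prop := out = detectConnection_alt cwlist
instance (cwlist : List String) (out : List (Int × List Int)) : Decidable (Spec_detectConnection cwlist out) := by unfold Spec_detectConnection; infer_instance

-- ===== CLAIM (what is proved, stated in full; the proofs are below) =====
def Claim_equal_detectConnection : Prop := ∀ (cwlist : List String), Dom_detectConnection cwlist → Spec_detectConnection cwlist (detectConnection cwlist)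

-- ===== LEMMAS AND PROOFS =====

-- getD of the init loop that inserts [] at every key is always [].
theorem pvGetD_initLoop (l : List Int) (d : PySem.Dict Int (List Int))
    (h : ∀ k, d.getD k [] = []) (k : Int) :
    (l.foldl (fun d i => d.insert i ([] : List Int)) d).getD k [] = [] := by
  induction l generalizing d with
  | nil => exact h k
  | cons i t ih =>
      simp only [List.foldl_cons]
      exact ih _ (fun k' => by rw [PySem.Dict.getD_insert]; split <;> simp [h])

-- getD after A's inner loop (fixed key i, append j when p j).
theorem pvGetD_inner (js : List Int) (d : PySem.Dict Int (List Int)) (i k : Int) (p : Int → Bool) :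
    (js.foldl (fun d j => if p j then d.modify i [] (fun v => v ++ [j]) else d) d).getD k []
      = d.getD k [] ++ (if k = i then js.filter p else []) := by
  rw [PySem.List.foldl_if_eq_foldl_filter p
        (fun (d : PySem.Dict Int (List Int)) j => d.modify i [] (fun v => v ++ [j])) js d]
  rw [show List.foldl (fun (d : PySem.Dict Int (List Int)) j => d.modify i [] (fun v => v ++ [j])) d (js.filter p)
        = List.foldl (fun (d : PySem.Dict Int (List Int)) q => d.modify q.1 [] (fun v => v ++ [q.2])) d
            ((js.filter p).map (fun j => ((i : Int), j)))
      from (List.foldl_map (f := fun j => ((i : Int), j))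
              (g := fun (d : PySem.Dict Int (List Int)) q => d.modify q.1 [] (fun v => v ++ [q.2]))
              (l := js.filter p) (init := d)).symm]
  rw [PySem.Dict.getD_foldl_modify_append]
  congr 1
  by_cases hk : k = i
  · subst hk
    simp [List.filter_map, Function.comp_def]
  · simp only [List.filter_map, Function.comp_def]
    rw [List.filter_eq_nil_iff.2 (fun a _ => by
      simp only [beq_iff_eq]
      exact fun h => hk h.symm)]
    simp [hk]

-- getD after A's outer double loop, for nodup outer indices.
theorem pvGetD_outer (c : Int → Int → Bool) (js : List Int) (is : List Int) (hnd : is.Nodup)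
    (d : PySem.Dict Int (List Int)) (k : Int) :
    (is.foldl (fun d i =>
        js.foldl (fun d j => if c i j then d.modify i [] (fun v => v ++ [j]) else d) d) d).getD k []
      = d.getD k [] ++ (if k ∈ is then js.filter (c k) else []) := by
  induction is generalizing d with
  | nil => simp
  | cons i t ih =>
      simp only [List.nodup_cons] at hnd
      simp only [List.foldl_cons]
      rw [ih hnd.2, pvGetD_inner]
      by_cases hk : k = i
      · subst hk
        simp [hnd.1]
      · simp [hk]

-- A's inner loop does not change the key list when i is already a key.
theorem pvKeys_inner (p : Int → Bool) (js : List Int) (d : PySem.Dict Int (List Int)) (i : Int)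
    (hi : i ∈ d.keys) :
    (js.foldl (fun d j => if p j then d.modify i [] (fun v => v ++ [j]) else d) d).keys = d.keys := by
  induction js generalizing d with
  | nil => rfl
  | cons j t ih =>
      simp only [List.foldl_cons]
      by_cases hp : p j
      · rw [if_pos hp]
        have hk : (d.modify i [] (fun v => v ++ [j])).keys = d.keys := by
          rw [PySem.Dict.keys_modify, PySem.Dict.keys_insert_of_contains]
          exact (PySem.Dict.contains_iff_mem_keys d i).2 hi
        rw [ih _ (by rw [hk]; exact hi), hk]
      · rw [if_neg hp]; exact ih d hi

-- A's outer double loop does not change the key list when every outer index is already a key.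
theorem pvKeys_outer (c : Int → Int → Bool) (js : List Int) (is : List Int)
    (d : PySem.Dict Int (List Int)) (h : ∀ i ∈ is, i ∈ d.keys) :
    (is.foldl (fun d i =>
        js.foldl (fun d j => if c i j then d.modify i [] (fun v => v ++ [j]) else d) d) d).keys
      = d.keys := by
  induction is generalizing d with
  | nil => rfl
  | cons i t ih =>
      simp only [List.foldl_cons]
      have hstep := pvKeys_inner (c i) js d i (h i (List.mem_cons_self ..))
      rw [ih _ (fun x hx => by rw [hstep]; exact h x (List.mem_cons_of_mem _ hx)), hstep]

-- A's result in closed form.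
theorem pvA_eq (cwlist : List String) :
    detectConnection cwlist
      = (PySem.List.pyRange 0 (PySem.List.len cwlist)).map
          (fun i => (i, (PySem.List.pyRange 0 (PySem.List.len cwlist)).filter
             (fun j => PySem.Str.slice (PySem.List.pyGetD cwlist i "") (some 1) none
                        == PySem.Str.slice (PySem.List.pyGetD cwlist j "") none (some (-1))))) := by
  unfold detectConnection
  simp only [PySem.List.foldl_append_singleton_eq_map, List.nil_append]
  have hfront : ∀ i : Int,
      PySem.List.pyGetD (cwlist.map (fun s => PySem.Str.slice s (some 1) none)) i ""
        = PySem.Str.slice (PySem.List.pyGetD cwlist i "") (some 1) none := by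
    intro i
    have h0 : PySem.Str.slice "" (some 1) none = "" := by decide
    have := PySem.List.pyGetD_map (fun s => PySem.Str.slice s (some 1) none) cwlist i ""
    simpa [h0] using this
  have hback : ∀ j : Int,
      PySem.List.pyGetD (cwlist.map (fun s => PySem.Str.slice s none (some (-1)))) j ""
        = PySem.Str.slice (PySem.List.pyGetD cwlist j "") none (some (-1)) := by
    intro j
    have h0 : PySem.Str.slice "" none (some (-1)) = "" := by decide
    have := PySem.List.pyGetD_map (fun s => PySem.Str.slice s none (some (-1))) cwlist j ""
    simpa [h0] using this
  simp only [hfront, hback]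
  set R := PySem.List.pyRange 0 (PySem.List.len cwlist) 1 with hR
  have hndR : R.Nodup := PySem.List.nodup_pyRange_one _ _
  set cm0 := R.foldl (fun d i => d.insert i ([] : List Int)) PySem.Dict.empty with hcm0
  have hkeys0 : cm0.keys = R := by
    rw [hcm0, PySem.Dict.keys_foldl_insert R (fun _ _ => ([] : List Int)) PySem.Dict.empty]
    rw [PySem.Dict.keys_empty, PySem.Set.update_nil_left, PySem.Set.ofList_eq_self_of_nodup _ hndR]
  have hgetD0 : ∀ k, cm0.getD k [] = [] :=
    pvGetD_initLoop R PySem.Dict.empty (fun k => PySem.Dict.getD_empty k []) 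
  set c : Int → Int → Bool := fun i j =>
    PySem.Str.slice (PySem.List.pyGetD cwlist i "") (some 1) none
      == PySem.Str.slice (PySem.List.pyGetD cwlist j "") none (some (-1)) with hc
  set cm1 := R.foldl (fun d i =>
      R.foldl (fun d j => if c i j then d.modify i [] (fun v => v ++ [j]) else d) d) cm0 with hcm1
  have hkeys1 : cm1.keys = R := by
    rw [hcm1, pvKeys_outer c R R cm0 (by rw [hkeys0]; exact fun i hi => hi), hkeys0]
  have hitems : cm1.items = R.map (fun k => (k, cm1.getD k [])) :=
    PySem.Dict.items_eq_map_keys cm1 (hkeys1 ▸ hndR) [] |>.trans (by rw [hkeys1])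
  rw [hitems]
  apply List.map_congr_left
  intro k hk
  rw [hcm1, pvGetD_outer c R R hndR cm0 k, hgetD0, if_pos hk, List.nil_append]

-- B's result in closed form.
theorem pvB_eq (cwlist : List String) :
    detectConnection_alt cwlist
      = (PySem.List.pyRange 0 (PySem.List.len cwlist)).map
          (fun i => (i, (PySem.List.pyRange 0 (PySem.List.len cwlist)).filter
             (fun j => PySem.Str.slice (PySem.List.pyGetD cwlist j "") none (some (-1))
                        == PySem.Str.slice (PySem.List.pyGetD cwlist i "") (some 1) none))) := by
  unfold detectConnection_alt
  set E := PySem.List.enumerate cwlist 0 with hE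
  set groups : PySem.Dict String (List Int) :=
    E.foldl (fun d p => d.modify (PySem.Str.slice p.2 none (some (-1))) [] (fun v => v ++ [p.1]))
      PySem.Dict.empty with hg
  have hgroups : ∀ s : String, groups.getD s []
      = (E.filter (fun p => PySem.Str.slice p.2 none (some (-1)) == s)).map (fun p => p.1) := by
    intro s
    rw [hg]
    rw [show E.foldl (fun (d : PySem.Dict String (List Int)) p =>
            d.modify (PySem.Str.slice p.2 none (some (-1))) [] (fun v => v ++ [p.1])) PySem.Dict.empty
          = List.foldl (fun (d : PySem.Dict String (List Int)) q => d.modify q.1 [] (fun v => v ++ [q.2]))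
              PySem.Dict.empty (E.map (fun p => (PySem.Str.slice p.2 none (some (-1)), p.1)))
        from (List.foldl_map (f := fun p : Int × String => (PySem.Str.slice p.2 none (some (-1)), p.1))
                (g := fun (d : PySem.Dict String (List Int)) q => d.modify q.1 [] (fun v => v ++ [q.2]))
                (l := E) (init := PySem.Dict.empty)).symm]
    rw [PySem.Dict.getD_foldl_modify_append]
    rw [PySem.Dict.getD_empty, List.nil_append, List.filter_map, List.map_map]
    simp only [Function.comp_def]
  have hfresh : (E.foldl (fun d p => d.insert p.1 (groups.getD (PySem.Str.slice p.2 (some 1) none) []))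
      (PySem.Dict.empty : PySem.Dict Int (List Int))).items
      = [] ++ E.map (fun p => (p.1, groups.getD (PySem.Str.slice p.2 (some 1) none) [])) := by
    exact PySem.Dict.items_foldl_insert_fresh E (fun p => p.1)
      (fun p => groups.getD (PySem.Str.slice p.2 (some 1) none) []) PySem.Dict.empty
      (fun a _ => PySem.Dict.contains_empty a.1)
      (by rw [PySem.List.map_fst_enumerate]; exact PySem.List.nodup_pyRange_one _ _)
  rw [hfresh, List.nil_append]
  have hEeq : E = (PySem.List.pyRange 0 (PySem.List.len cwlist)).map
      (fun j => (j, PySem.List.pyGetD cwlist j "")) := by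
    rw [hE, PySem.List.enumerate_eq_map_pyRange cwlist ""]
  conv_lhs => rw [hEeq]
  rw [List.map_map]
  apply List.map_congr_left
  intro i _
  simp only [Function.comp_def]
  congr 1
  rw [hgroups, hEeq, List.filter_map, List.map_map]
  simp only [Function.comp_def, List.map_id']

-- ===== VERDICT (by name: the statement is the Claim_ definition above) =====
theorem detectConnection_spec : Claim_equal_detectConnection := by
  intro cwlist _
  unfold Spec_detectConnection
  rw [pvA_eq, pvB_eq]
  have hpt : ∀ i j : Int,
      (PySem.Str.slice (PySem.List.pyGetD cwlist i "") (some 1) none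
        == PySem.Str.slice (PySem.List.pyGetD cwlist j "") none (some (-1)))
      = (PySem.Str.slice (PySem.List.pyGetD cwlist j "") none (some (-1))
        == PySem.Str.slice (PySem.List.pyGetD cwlist i "") (some 1) none) :=
    fun i j => Bool.beq_comm
  simp only [hpt]
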